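-- pv_equiv track=rewrite | github.com/NoxelEcnord/PDF-RAVEN | pdfraven/generators.py | gen_custom_brute
-- ===== SOURCE A (Python) =====
-- import itertools
--
-- def gen_custom_brute(charset, min_l, max_l, start_after=None):
--     """
--     Generates passwords from a custom charset and length range.
--     """
--     start_len = len(start_after) if start_after else min_l
--
--     for length in range(start_len, max_l + 1):
--         g = itertools.product(charset, repeat=length)
--
--         if start_after and len(start_after) == length:
--             start_tuple = tuple(start_after)
--             g = itertools.dropwhile(lambda x: x != start_tuple, g)
--             next(g, None)
--             start_after = None
--
--         for p in g:
--             yield "".join(p)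
-- ===== SOURCE B (Python) =====
-- def gen_custom_brute(charset, min_l, max_l, start_after=None):
--     """
--     Same passwords as the dropwhile version, but start_after is ranked to its
--     numeric position (base-k, O(len)) and enumeration resumes right after it,
--     decoding each position back to a word.
--     """
--     k = len(charset)
--     start_pos = 0
--     if start_after:
--         start_len = len(start_after)
--         if start_len <= max_l:  # only rank when some length will be enumerated
--             digits = [charset.find(ch) for ch in start_after]
--             if -1 in digits:
--                 start_pos = k ** start_len  # not reachable: skip the whole length
--             else:
--                 rank = 0
--                 for d in digits:
--                     rank = rank * k + d
--                 start_pos = rank + 1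
--     else:
--         start_len = min_l
--     for length in range(start_len, max_l + 1):
--         first = start_pos if length == start_len else 0
--         for pos in range(first, k ** length):
--             word = []
--             p = pos
--             for _ in range(length):
--                 p, r = divmod(p, k)
--                 word.append(charset[r])
--             yield "".join(reversed(word))
-- ===== Notes on version B (the rewrite author's own statement) =====
-- stated objective: alternative
-- what changed: B ranks start_after as a base-|charset| number and resumes enumeration by decoding positions from rank+1, instead of A's generating the full itertools.product and dropwhile-scanning for the start tuple.
import Mathlib
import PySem

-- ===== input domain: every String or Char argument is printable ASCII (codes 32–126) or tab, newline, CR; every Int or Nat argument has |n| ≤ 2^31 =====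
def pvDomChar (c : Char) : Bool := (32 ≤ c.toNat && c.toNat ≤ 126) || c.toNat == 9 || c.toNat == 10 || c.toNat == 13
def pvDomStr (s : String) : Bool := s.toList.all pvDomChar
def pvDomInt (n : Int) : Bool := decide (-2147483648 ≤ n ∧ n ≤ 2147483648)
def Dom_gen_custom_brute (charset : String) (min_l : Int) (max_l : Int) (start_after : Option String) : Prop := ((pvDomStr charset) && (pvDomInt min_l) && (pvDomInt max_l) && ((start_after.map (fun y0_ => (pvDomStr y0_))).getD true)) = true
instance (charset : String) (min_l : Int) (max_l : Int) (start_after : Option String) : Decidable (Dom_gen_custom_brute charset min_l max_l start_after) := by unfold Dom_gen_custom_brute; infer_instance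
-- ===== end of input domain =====

-- B ranks start_after to its numeric position (base |charset|) and resumes enumeration by
-- decoding positions from rank+1, instead of A's generate-everything-and-dropwhile scan
-- (an alternative skip mechanism; overall cost is dominated by the emitted output either way).

-- ===== PORT A =====
-- itertools.product(charset, repeat=n) as lists of chars, in product order
def pyProduct (cs : List Char) : Nat → List (List Char)
  | 0 => [[]]
  | n+1 => cs.flatMap (fun c => (pyProduct cs n).map (fun t => c :: t))

-- the 'for length in range(...)' loop, threading the start_after state (set to none after the skip)
def genA_loop (cs : List Char) : Option (List Char) → List String → List Int → List String
  | _, acc, [] => acc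
  | some s, acc, L :: rest =>
      if (s.length : Int) = L then
        -- dropwhile(lambda x: x != start_tuple, g); next(g, None); start_after = None
        genA_loop cs none
          (acc ++ (((pyProduct cs L.toNat).dropWhile (fun x => x != s)).drop 1).map
            (fun p => String.ofList p)) rest
      else
        genA_loop cs (some s) (acc ++ (pyProduct cs L.toNat).map (fun p => String.ofList p)) rest
  | none, acc, L :: rest =>
      genA_loop cs none (acc ++ (pyProduct cs L.toNat).map (fun p => String.ofList p)) rest

def gen_custom_brute (charset : String) (min_l : Int) (max_l : Int) (start_after : Option String) : List String :=
  match start_after with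
  | some s =>
      if s.toList = [] then  -- falsy start_after
        genA_loop charset.toList none [] (PySem.List.pyRange min_l (max_l + 1) 1)
      else
        genA_loop charset.toList (some s.toList) []
          (PySem.List.pyRange ((s.toList.length : Int)) (max_l + 1) 1)
  | none => genA_loop charset.toList none [] (PySem.List.pyRange min_l (max_l + 1) 1)

-- ===== PORT B =====
-- the inner decode loop of Source B: repeated divmod, least-significant digit first (caller reverses);
-- charset[r] is exact here: r = p % k < k at every call Source B makes
def decodeWord (cs : List Char) : Nat → Nat → List Char
  | 0, _ => []
  | n+1, p => cs.getD (p % cs.length) 'a' :: decodeWord cs n (p / cs.length)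

-- the 'for length in range(...)' loop of Source B; range(first, k**length) is (range (k^len)).drop first
def genB_body (cs : List Char) (start_len : Int) (start_pos : Nat) (max_l : Int) : List String :=
  (PySem.List.pyRange start_len (max_l + 1) 1).flatMap (fun L =>
    ((List.range (cs.length ^ L.toNat)).drop (if L = start_len then start_pos else 0)).map
      (fun p => String.ofList (decodeWord cs L.toNat p).reverse))

-- charset.find(ch) is ported as findIdx?; '-1 in digits' becomes 'contains none'
def gen_custom_brute_alt (charset : String) (min_l : Int) (max_l : Int) (start_after : Option String) : List String :=
  match start_after with
  | some s =>
      if s.toList = [] then genB_body charset.toList min_l 0 max_l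
      else
        genB_body charset.toList ((s.toList.length : Int))
          (if ((s.toList.length : Int)) ≤ max_l then  -- only rank when some length will be enumerated
            (if (s.toList.map (fun ch => charset.toList.findIdx? (fun c => c == ch))).contains none
             then charset.toList.length ^ s.toList.length
             else (s.toList.map (fun ch => charset.toList.findIdx? (fun c => c == ch))).foldl
                    (fun r d => r * charset.toList.length + d.getD 0) 0 + 1)
           else 0)
          max_l
  | none => genB_body charset.toList min_l 0 max_l

-- ===== PRECONDITION & SPEC =====
-- Pre_ excludes exactly the inputs where Python A raises ValueError: a falsy start_after with
-- min_l < 0 and min_l ≤ max_l reaches itertools.product(charset, repeat=<negative>).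
def Pre_gen_custom_brute (charset : String) (min_l : Int) (max_l : Int) (start_after : Option String) : Prop :=
  (start_after.getD "" ≠ "") ∨ 0 ≤ min_l ∨ max_l < min_l
instance (charset : String) (min_l : Int) (max_l : Int) (start_after : Option String) : Decidable (Pre_gen_custom_brute charset min_l max_l start_after) := by unfold Pre_gen_custom_brute; infer_instance

def pvWitness_gen_custom_brute : String × Int × Int × Option String := ("ab", 1, 2, some "a")

def Spec_gen_custom_brute (charset : String) (min_l : Int) (max_l : Int) (start_after : Option String) (out : List String) : Prop := out = gen_custom_brute_alt charset min_l max_l start_after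
instance (charset : String) (min_l : Int) (max_l : Int) (start_after : Option String) (out : List String) : Decidable (Spec_gen_custom_brute charset min_l max_l start_after out) := by unfold Spec_gen_custom_brute; infer_instance

-- ===== CLAIM =====
def Claim_equal_gen_custom_brute : Prop := ∀ (charset : String) (min_l : Int) (max_l : Int) (start_after : Option String), Dom_gen_custom_brute charset min_l max_l start_after → Pre_gen_custom_brute charset min_l max_l start_after → Spec_gen_custom_brute charset min_l max_l start_after (gen_custom_brute charset min_l max_l start_after)

-- ===== LEMMAS AND PROOFS =====

-- the word at position p, most-significant digit first (the mathematical bridge between the ports)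
def fvec (cs : List Char) : Nat → Nat → List Char
  | 0, _ => []
  | n+1, p => cs.getD (p / cs.length ^ n) 'a' :: fvec cs n (p % cs.length ^ n)

theorem flatMap_range_map {α β : Type} (d : α) (g : α → Nat → β) :
    ∀ (l : List α) (m : Nat),
      l.flatMap (fun a => (List.range m).map (g a))
        = (List.range (l.length * m)).map (fun p => g (l.getD (p / m) d) (p % m)) := by
  intro l m
  induction l with
  | nil => simp
  | cons a t ih =>
    rcases Nat.eq_zero_or_pos m with hm | hm
    · subst hm; simp [List.flatMap]
    · rw [List.flatMap_cons, ih]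
      have hlen : (a :: t).length * m = m + t.length * m := by
        simp [List.length_cons]; ring
      rw [hlen, List.range_add, List.map_append, List.map_map]
      congr 1
      · apply List.map_congr_left
        intro p hp
        have hpm : p < m := List.mem_range.mp hp
        rw [Nat.div_eq_of_lt hpm, Nat.mod_eq_of_lt hpm]
        simp
      · apply List.map_congr_left
        intro p hp
        simp only [Function.comp_apply]
        have h1 : (m + p) / m = p / m + 1 := by
          rw [Nat.add_comm, Nat.add_div_right _ hm]
        have h2 : (m + p) % m = p % m := Nat.add_mod_left m p
        rw [h1, h2, List.getD_cons_succ]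

theorem pyProduct_eq (cs : List Char) :
    ∀ n, pyProduct cs n = (List.range (cs.length ^ n)).map (fvec cs n) := by
  intro n
  induction n with
  | zero => simp [pyProduct, fvec]
  | succ n ih =>
    show cs.flatMap (fun c => (pyProduct cs n).map (fun t => c :: t)) = _
    rw [ih]
    have : ∀ c : Char, ((List.range (cs.length ^ n)).map (fvec cs n)).map (fun t => c :: t)
        = (List.range (cs.length ^ n)).map (fun p => c :: fvec cs n p) := by
      intro c; rw [List.map_map]; rfl
    simp only [this]
    rw [flatMap_range_map 'a' (fun c p => c :: fvec cs n p)]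
    have hpow : cs.length * cs.length ^ n = cs.length ^ (n+1) := by
      rw [pow_succ, Nat.mul_comm]
    rw [hpow]
    rfl

theorem fvec_snoc (cs : List Char) :
    ∀ n p, p < cs.length ^ (n+1) →
      fvec cs (n+1) p = fvec cs n (p / cs.length) ++ [cs.getD (p % cs.length) 'a'] := by
  intro n
  induction n with
  | zero =>
    intro p hp
    have hp' : p < cs.length := by simpa using hp
    show cs.getD (p / cs.length ^ 0) 'a' :: fvec cs 0 (p % cs.length ^ 0) = _
    simp [fvec, Nat.mod_eq_of_lt hp']
  | succ n ih =>
    intro p hp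
    have hk : 0 < cs.length := by
      rcases Nat.eq_zero_or_pos cs.length with h | h
      · rw [h] at hp; simp at hp
      · exact h
    have hmod : p % cs.length ^ (n+1) < cs.length ^ (n+1) :=
      Nat.mod_lt _ (Nat.pow_pos hk)
    show cs.getD (p / cs.length ^ (n+1)) 'a' :: fvec cs (n+1) (p % cs.length ^ (n+1)) = _
    rw [ih _ hmod]
    show _ = cs.getD (p / cs.length / cs.length ^ n) 'a' :: fvec cs n (p / cs.length % cs.length ^ n) ++ _
    have e1 : p / cs.length ^ (n+1) = p / cs.length / cs.length ^ n := by
      rw [Nat.div_div_eq_div_mul, ← pow_succ']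
    have e2 : p % cs.length ^ (n+1) / cs.length = p / cs.length % cs.length ^ n := by
      rw [pow_succ', Nat.mod_mul_right_div_self]
    have e3 : p % cs.length ^ (n+1) % cs.length = p % cs.length :=
      Nat.mod_mod_of_dvd p (dvd_pow_self cs.length (Nat.succ_ne_zero n))
    rw [e1, e2, e3]
    simp

theorem decode_rev_eq_fvec (cs : List Char) :
    ∀ n p, p < cs.length ^ n → (decodeWord cs n p).reverse = fvec cs n p := by
  intro n
  induction n with
  | zero => intro p hp; simp [decodeWord, fvec]
  | succ n ih =>
    intro p hp
    have hk : 0 < cs.length := by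
      rcases Nat.eq_zero_or_pos cs.length with h | h
      · rw [h] at hp; simp at hp
      · exact h
    have hdiv : p / cs.length < cs.length ^ n := by
      rw [Nat.div_lt_iff_lt_mul hk, ← pow_succ]
      exact hp
    show (cs.getD (p % cs.length) 'a' :: decodeWord cs n (p / cs.length)).reverse = _
    rw [List.reverse_cons, ih _ hdiv, fvec_snoc cs n p hp]

theorem horner_shift (k : Nat) :
    ∀ (ds : List Nat) (a : Nat),
      ds.foldl (fun r d => r * k + d) a = a * k ^ ds.length + ds.foldl (fun r d => r * k + d) 0 := by
  intro ds
  induction ds with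
  | nil => intro a; simp
  | cons d t ih =>
    intro a
    show t.foldl _ (a * k + d) = a * k ^ (t.length + 1) + t.foldl _ (0 * k + d)
    rw [ih (a * k + d), ih (0 * k + d), pow_succ]
    ring

theorem rank_spec (cs : List Char) :
    ∀ s : List Char, (∀ ch ∈ s, (cs.findIdx? (fun c => c == ch)).isSome) →
      (s.foldl (fun a ch => a * cs.length + (cs.findIdx? (fun c => c == ch)).getD 0) 0 < cs.length ^ s.length)
      ∧ fvec cs s.length (s.foldl (fun a ch => a * cs.length + (cs.findIdx? (fun c => c == ch)).getD 0) 0) = s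
      ∧ ∀ u < s.foldl (fun a ch => a * cs.length + (cs.findIdx? (fun c => c == ch)).getD 0) 0,
          fvec cs s.length u ≠ s := by
  intro s
  induction s with
  | nil => intro _; refine ⟨by simp, by simp [fvec], by simp⟩
  | cons ch t ih =>
    intro hall
    obtain ⟨i, hi⟩ := Option.isSome_iff_exists.mp (hall ch (List.mem_cons_self))
    obtain ⟨hilt, hieq, himin⟩ := List.findIdx?_eq_some_iff_getElem.mp hi
    have hch : cs[i] = ch := by simpa using hieq
    have hk : 0 < cs.length := Nat.lt_of_le_of_lt (Nat.zero_le i) hilt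
    have hm : 0 < cs.length ^ t.length := Nat.pow_pos hk
    obtain ⟨iht1, iht2, iht3⟩ := ih (fun c hc => hall c (List.mem_cons_of_mem _ hc))
    set m := cs.length ^ t.length with hmdef
    set rt := t.foldl (fun a c => a * cs.length + (cs.findIdx? (fun x => x == c)).getD 0) 0 with hrt
    have hmap : ∀ a : Nat,
        (t.map (fun c => (cs.findIdx? (fun x => x == c)).getD 0)).foldl (fun r d => r * cs.length + d) a
          = t.foldl (fun a c => a * cs.length + (cs.findIdx? (fun x => x == c)).getD 0) a := by
      intro a; rw [List.foldl_map]
    have hfold : (ch :: t).foldl (fun a c => a * cs.length + (cs.findIdx? (fun x => x == c)).getD 0) 0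
        = i * m + rt := by
      show t.foldl _ (0 * cs.length + (cs.findIdx? (fun x => x == ch)).getD 0) = _
      rw [hi]
      have h0 : (0 : Nat) * cs.length + (Option.some i).getD 0 = i := by simp
      rw [h0, ← hmap i, horner_shift, hmap 0, List.length_map]
    have hrtm : rt < m := iht1
    have hr_lt : i * m + rt < cs.length ^ (t.length + 1) := by
      have h3 : i * m + rt < (i + 1) * m := by
        calc i * m + rt < i * m + m := by omega
          _ = (i + 1) * m := by ring
      have h2 : (i + 1) * m ≤ cs.length * m := Nat.mul_le_mul_right m hilt
      have h4 : cs.length ^ (t.length + 1) = cs.length * m := by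
        rw [pow_succ, hmdef]; ring
      omega
    have hdiv : (i * m + rt) / m = i := by
      rw [Nat.mul_comm i m, Nat.mul_add_div hm, Nat.div_eq_of_lt hrtm]
      omega
    have hmod : (i * m + rt) % m = rt := by
      rw [Nat.mul_comm i m, Nat.mul_add_mod, Nat.mod_eq_of_lt hrtm]
    refine ⟨by rw [hfold]; simpa using hr_lt, ?_, ?_⟩
    · rw [hfold]
      show cs.getD ((i * m + rt) / m) 'a' :: fvec cs t.length ((i * m + rt) % m) = _
      rw [hdiv, hmod, List.getD_eq_getElem cs 'a' hilt, hch, iht2]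
    · rw [hfold]
      intro u hu heq
      have hu_lt : u < cs.length ^ (t.length + 1) := lt_trans hu hr_lt
      have hq : u / m < cs.length := by
        rw [Nat.div_lt_iff_lt_mul hm]
        have h4 : cs.length ^ (t.length + 1) = cs.length * m := by
          rw [pow_succ, hmdef]; ring
        omega
      have heq' : cs.getD (u / m) 'a' :: fvec cs t.length (u % m) = ch :: t := heq
      have hhead : cs.getD (u / m) 'a' = ch := (List.cons.injEq _ _ _ _ ▸ heq').1
      have htail : fvec cs t.length (u % m) = t := (List.cons.injEq _ _ _ _ ▸ heq').2
      rw [List.getD_eq_getElem cs 'a' hq] at hhead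
      rcases Nat.lt_trichotomy (u / m) i with hlt | heqi | hgt
      · exact himin _ hlt (by simpa using hhead)
      · have h := Nat.div_add_mod u m
        rw [heqi, Nat.mul_comm m i] at h
        have : u % m < rt := by omega
        exact iht3 _ this htail
      · have h1 : (i + 1) * m ≤ (u / m) * m := Nat.mul_le_mul_right m hgt
        have h2 : (u / m) * m ≤ u := Nat.div_mul_le_self u m
        have h3 : i * m + rt < (i + 1) * m := by
          calc i * m + rt < i * m + m := by omega
            _ = (i + 1) * m := by ring
        omega

theorem rank_none (cs : List Char) :
    ∀ s : List Char, (∃ ch ∈ s, cs.findIdx? (fun c => c == ch) = none) →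
      ∀ u < cs.length ^ s.length, fvec cs s.length u ≠ s := by
  intro s
  induction s with
  | nil => rintro ⟨ch, hch, _⟩; simp at hch
  | cons ch t ih =>
    rintro ⟨c0, hc0, hnone⟩ u hu heq
    have hk : 0 < cs.length := by
      rcases Nat.eq_zero_or_pos cs.length with h | h
      · rw [h] at hu; simp at hu
      · exact h
    have hm : 0 < cs.length ^ t.length := Nat.pow_pos hk
    have heq' : cs.getD (u / cs.length ^ t.length) 'a' :: fvec cs t.length (u % cs.length ^ t.length) = ch :: t := heq
    have hhead : cs.getD (u / cs.length ^ t.length) 'a' = ch := (List.cons.injEq _ _ _ _ ▸ heq').1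
    have htail : fvec cs t.length (u % cs.length ^ t.length) = t := (List.cons.injEq _ _ _ _ ▸ heq').2
    have hq : u / cs.length ^ t.length < cs.length := by
      rw [Nat.div_lt_iff_lt_mul hm]
      have h4 : cs.length ^ (t.length + 1) = cs.length * cs.length ^ t.length := by
        rw [pow_succ]; ring
      have : u < cs.length ^ (t.length + 1) := hu
      omega
    rcases List.mem_cons.mp hc0 with hc | hc
    · subst hc
      have := List.findIdx?_eq_none_iff.mp hnone
      have hfalse := this _ (List.getElem_mem hq)
      rw [List.getD_eq_getElem cs 'a' hq] at hhead
      simp [hhead] at hfalse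
    · exact ih ⟨c0, hc, hnone⟩ _ (Nat.mod_lt _ hm) htail

theorem dropWhile_bne_eq_drop {α : Type} [BEq α] [LawfulBEq α] (t : α) :
    ∀ (l : List α) (r : Nat) (hr : r < l.length), l[r] = t →
      (∀ j (hj : j < r), l[j]'(by omega) ≠ t) →
      l.dropWhile (fun x => x != t) = l.drop r := by
  intro l
  induction l with
  | nil => intro r hr; simp at hr
  | cons a tl ih =>
    intro r hr hget hmin
    cases r with
    | zero =>
      simp at hget
      subst hget
      simp
    | succ r =>
      have ha : a ≠ t := by
        have := hmin 0 (Nat.succ_pos r)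
        simpa using this
      rw [List.dropWhile_cons]
      simp only [bne_iff_ne, ne_eq, ha, not_false_eq_true, if_pos]
      rw [List.drop_succ_cons]
      exact ih r (by simpa using hr) (by simpa using hget)
        (fun j hj => by have := hmin (j+1) (by omega); simpa using this)

theorem product_map_eq (cs : List Char) (n : Nat) :
    (pyProduct cs n).map (fun p => String.ofList p)
      = (List.range (cs.length ^ n)).map (fun p => String.ofList (decodeWord cs n p).reverse) := by
  rw [pyProduct_eq, List.map_map]
  apply List.map_congr_left
  intro p hp
  have := decode_rev_eq_fvec cs n p (List.mem_range.mp hp)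
  simp [this]

theorem genA_none (cs : List Char) :
    ∀ (ls : List Int) (acc : List String),
      genA_loop cs none acc ls
        = acc ++ ls.flatMap (fun L =>
            (List.range (cs.length ^ L.toNat)).map (fun p => String.ofList (decodeWord cs L.toNat p).reverse)) := by
  intro ls
  induction ls with
  | nil => intro acc; simp [genA_loop]
  | cons L rest ih =>
    intro acc
    show genA_loop cs none (acc ++ (pyProduct cs L.toNat).map (fun p => String.ofList p)) rest = _
    rw [ih, product_map_eq, List.flatMap_cons, List.append_assoc]

theorem genB_zero (cs : List Char) (a b : Int) :
    genB_body cs a 0 b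
      = (PySem.List.pyRange a (b + 1) 1).flatMap (fun L =>
          (List.range (cs.length ^ L.toNat)).map (fun p => String.ofList (decodeWord cs L.toNat p).reverse)) := by
  unfold genB_body
  apply List.flatMap_congr
  intro L _
  simp [ite_self]

theorem head_eq (cs : List Char) (s : List Char) :
    (((pyProduct cs s.length).dropWhile (fun x => x != s)).drop 1).map (fun p => String.ofList p)
      = ((List.range (cs.length ^ s.length)).drop
          (if (s.map (fun ch => cs.findIdx? (fun c => c == ch))).contains none
           then cs.length ^ s.length
           else (s.map (fun ch => cs.findIdx? (fun c => c == ch))).foldl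
                  (fun r d => r * cs.length + d.getD 0) 0 + 1)).map
        (fun p => String.ofList (decodeWord cs s.length p).reverse) := by
  by_cases hc : (s.map (fun ch => cs.findIdx? (fun c => c == ch))).contains none
  · -- some character of start_after is not in the charset: A scans everything away, B skips the length
    rw [if_pos hc]
    have hnone : ∃ ch ∈ s, cs.findIdx? (fun c => c == ch) = none := by
      have : none ∈ s.map (fun ch => cs.findIdx? (fun c => c == ch)) :=
        List.contains_iff_mem.mp hc
      obtain ⟨ch, hch, he⟩ := List.mem_map.mp this
      exact ⟨ch, hch, he⟩
    have hdw : (pyProduct cs s.length).dropWhile (fun x => x != s) = [] := by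
      apply List.dropWhile_eq_nil_iff.mpr
      intro x hx
      rw [pyProduct_eq] at hx
      obtain ⟨p, hp, hfx⟩ := List.mem_map.mp hx
      have hne := rank_none cs s hnone p (List.mem_range.mp hp)
      simp [← hfx, hne]
    rw [hdw]
    have : (List.range (cs.length ^ s.length)).drop (cs.length ^ s.length) = [] := by
      apply List.drop_eq_nil_of_le
      simp
    rw [this]
    simp
  · rw [if_neg hc]
    have hall : ∀ ch ∈ s, (cs.findIdx? (fun c => c == ch)).isSome := by
      intro ch hch
      rcases h : cs.findIdx? (fun c => c == ch) with _ | i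
      · exact absurd (List.contains_iff_mem.mpr (List.mem_map.mpr ⟨ch, hch, h⟩)) hc
      · rfl
    obtain ⟨hrlt, hrval, hrmin⟩ := rank_spec cs s hall
    set r := s.foldl (fun a ch => a * cs.length + (cs.findIdx? (fun c => c == ch)).getD 0) 0 with hrdef
    have hfold : (s.map (fun ch => cs.findIdx? (fun c => c == ch))).foldl
        (fun a d => a * cs.length + d.getD 0) 0 = r := by
      rw [List.foldl_map]
    rw [hfold]
    set N := cs.length ^ s.length with hN
    set l := (List.range N).map (fvec cs s.length) with hl
    have hlen : l.length = N := by simp [hl]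
    have hget : ∀ (j : Nat) (hj : j < N), l[j]'(by omega) = fvec cs s.length j := by
      intro j hj; simp [hl]
    have hdw : l.dropWhile (fun x => x != s) = l.drop r := by
      apply dropWhile_bne_eq_drop s l r (by omega) (by rw [hget r hrlt]; exact hrval)
      intro j hj
      rw [hget j (by omega)]
      exact hrmin j hj
    rw [pyProduct_eq, ← hl, hdw, List.drop_drop]
    have hmapdrop : l.drop (r + 1) = ((List.range N).drop (r + 1)).map (fvec cs s.length) := by
      rw [hl, List.map_drop]
    rw [hmapdrop, List.map_map]
    apply List.map_congr_left
    intro p hp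
    have hpN : p < N := List.mem_range.mp (List.mem_of_mem_drop hp)
    have := decode_rev_eq_fvec cs s.length p hpN
    simp [this]

-- ===== VERDICT =====
theorem gen_custom_brute_spec : Claim_equal_gen_custom_brute := by
  intro charset min_l max_l start_after hdom hpre
  unfold Spec_gen_custom_brute gen_custom_brute gen_custom_brute_alt
  rcases start_after with _ | s
  · dsimp only
    rw [genA_none, genB_zero, List.nil_append]
  · dsimp only
    by_cases hs : s.toList = []
    · rw [if_pos hs, if_pos hs, genA_none, genB_zero, List.nil_append]
    · rw [if_neg hs, if_neg hs]
      set cs := charset.toList with hcs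
      set SL : Int := ((s.toList.length : Int)) with hSL
      set sp : Nat :=
        (if (s.toList.map (fun ch => cs.findIdx? (fun c => c == ch))).contains none
         then cs.length ^ s.toList.length
         else (s.toList.map (fun ch => cs.findIdx? (fun c => c == ch))).foldl
                (fun r d => r * cs.length + d.getD 0) 0 + 1) with hsp
      rcases (by omega : (max_l + 1) ≤ SL ∨ SL < max_l + 1) with h | h
      · rw [genB_body, PySem.List.pyRange_one_eq_nil h]
        simp [genA_loop]
      · rw [if_pos (show SL ≤ max_l by omega), genB_body, PySem.List.pyRange_one_cons h]
        show genA_loop cs (some s.toList) [] (SL :: _) = _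
        rw [genA_loop]
        rw [if_pos rfl, List.flatMap_cons, genA_none, List.nil_append]
        have htoNat : SL.toNat = s.toList.length := by simp [hSL]
        have htail :
            (PySem.List.pyRange (SL + 1) (max_l + 1) 1).flatMap (fun L =>
              ((List.range (cs.length ^ L.toNat)).drop (if L = SL then sp else 0)).map
                (fun p => String.ofList (decodeWord cs L.toNat p).reverse))
            = (PySem.List.pyRange (SL + 1) (max_l + 1) 1).flatMap (fun L =>
                (List.range (cs.length ^ L.toNat)).map
                  (fun p => String.ofList (decodeWord cs L.toNat p).reverse)) := by
          apply List.flatMap_congr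
          intro L hL
          have hge : SL + 1 ≤ L := (PySem.List.mem_pyRange_one.mp hL).1
          rw [if_neg (by omega), List.drop_zero]
        rw [if_pos rfl, htail]
        congr 1
        rw [htoNat, hsp]
        exact head_eq cs s.toList
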